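-- pv_equiv track=rewrite | github.com/oleitao/ai-engineer-academy | FIA/unsupervised-models/unsupervised_analyze_comments.py | exact_duplicate_groups
-- ===== SOURCE A (Python) =====
-- from typing import Dict, List, Optional, Tuple, Iterable, Union
--
-- def exact_duplicate_groups(clean_texts: List[str]) -> Dict[int, int]:
--     """Returns mapping index -> group_id for exact duplicates (case/space/punct normalized)."""
--     groups: Dict[str, int] = {}
--     mapping: Dict[int, int] = {}
--     gid = 1
--     for i, t in enumerate(clean_texts):
--         key = t
--         if key in groups:
--             mapping[i] = groups[key]
--         else:
--             groups[key] = gid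
--             mapping[i] = gid
--             gid += 1
--     # Re-label groups that appear only once as 0 (unique)
--     from collections import Counter
--
--     counts = Counter(mapping.values())
--     for i, g in list(mapping.items()):
--         if counts[g] <= 1:
--             mapping[i] = 0
--     return mapping
-- ===== SOURCE B (Python) =====
-- from typing import Dict, List
--
--
-- def exact_duplicate_groups(clean_texts: List[str]) -> Dict[int, int]:
--     """Returns mapping index -> group_id for exact duplicates (case/space/punct normalized)."""
--     groups: Dict[str, List[int]] = {}
--     for i, t in enumerate(clean_texts):
--         groups.setdefault(t, []).append(i)
--     res = [0] * len(clean_texts)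
--     for gid, idxs in enumerate(groups.values(), start=1):
--         if len(idxs) > 1:
--             for i in idxs:
--                 res[i] = gid
--     return {i: g for i, g in enumerate(res)}
-- ===== Notes on version B (the rewrite author's own statement) =====
-- stated objective: alternative
-- what changed: B groups the indices by text into one text->indices dict, then walks the groups once, numbering each distinct text and writing its group id into a preallocated index array for every multi-occurrence group (singletons stay 0), instead of A's per-index provisional-gid assignment followed by a Counter over the gids and an in-place relabel pass.
import Mathlib
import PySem

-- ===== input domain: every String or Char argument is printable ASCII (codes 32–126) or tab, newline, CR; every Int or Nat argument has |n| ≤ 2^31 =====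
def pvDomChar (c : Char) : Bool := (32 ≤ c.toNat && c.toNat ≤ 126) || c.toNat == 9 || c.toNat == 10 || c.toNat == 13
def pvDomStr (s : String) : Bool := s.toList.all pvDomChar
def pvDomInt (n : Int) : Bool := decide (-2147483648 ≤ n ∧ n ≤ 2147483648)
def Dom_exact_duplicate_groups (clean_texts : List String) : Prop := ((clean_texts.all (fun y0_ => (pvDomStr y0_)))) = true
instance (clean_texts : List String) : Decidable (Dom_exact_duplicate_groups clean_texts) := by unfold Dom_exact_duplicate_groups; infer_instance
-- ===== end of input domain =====

-- B groups the indices by text first (one text→indices dict), then fills an index array per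
-- group — assigning a fresh group id per distinct text and skipping singleton groups — instead
-- of A's per-index provisional-id assignment followed by a Counter-based relabel pass (alternative decomposition).

-- ===== PORT A =====
def exact_duplicate_groups (clean_texts : List String) : List (Int × Int) :=
  let st := (PySem.List.enumerate clean_texts).foldl
    (fun (st : PySem.Dict String Int × PySem.Dict Int Int × Int) p =>
      if st.1.contains p.2 then
        (st.1, st.2.1.insert p.1 (st.1.getD p.2 0), st.2.2)
      else
        (st.1.insert p.2 st.2.2, st.2.1.insert p.1 st.2.2, st.2.2 + 1))
    (PySem.Dict.empty, PySem.Dict.empty, 1)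
  let mapping := st.2.1
  let counts := PySem.Dict.counter mapping.values
  let mapping2 := mapping.items.foldl
    (fun (m : PySem.Dict Int Int) q => if counts.getD q.2 0 ≤ 1 then m.insert q.1 0 else m)
    mapping
  mapping2.items

-- ===== PORT B =====
def exact_duplicate_groups_alt (clean_texts : List String) : List (Int × Int) :=
  let groups := (PySem.List.enumerate clean_texts).foldl
    (fun (g : PySem.Dict String (List Int)) p => g.modify p.2 [] (fun l => l ++ [p.1]))
    PySem.Dict.empty
  let res0 := PySem.List.pyRepeat [(0 : Int)] (PySem.List.len clean_texts)
  let res := (PySem.List.enumerate groups.values 1).foldl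
    (fun (r : List Int) q =>
      if 1 < PySem.List.len q.2 then
        q.2.foldl (fun (r : List Int) i => PySem.List.pySetD r i q.1) r
      else r)
    res0
  ((PySem.List.enumerate res).foldl
    (fun (d : PySem.Dict Int Int) p => d.insert p.1 p.2) PySem.Dict.empty).items

-- ===== PRECONDITION & SPEC =====
def Spec_exact_duplicate_groups (clean_texts : List String) (out : List (Int × Int)) : Prop := out = exact_duplicate_groups_alt clean_texts
instance (clean_texts : List String) (out : List (Int × Int)) : Decidable (Spec_exact_duplicate_groups clean_texts out) := by unfold Spec_exact_duplicate_groups; infer_instance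

-- ===== CLAIM (what is proved, stated in full; the proofs are below) =====
def Claim_equal_exact_duplicate_groups : Prop := ∀ (clean_texts : List String), Dom_exact_duplicate_groups clean_texts → Spec_exact_duplicate_groups clean_texts (exact_duplicate_groups clean_texts)

-- ===== LEMMAS AND PROOFS =====

-- the common value both programs compute at index j: 0 for a singleton text,
-- else 1 + position of the text among the distinct texts in first-occurrence order
def pvVal (ts : List String) (t : String) : Int :=
  if ts.count t ≤ 1 then 0 else 1 + (List.idxOf t (PySem.Set.ofList ts) : Int)

-- ===== A-side: closed form of A's first loop =====
def pvAssign : List String → PySem.Dict String Int → Int → List Int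
  | [], _, _ => []
  | t :: ts, G, gid =>
    if G.contains t then G.getD t 0 :: pvAssign ts G gid
    else gid :: pvAssign ts (G.insert t gid) (gid + 1)

def pvBuild : List String → PySem.Dict String Int → Int → PySem.Dict String Int
  | [], G, _ => G
  | t :: ts, G, gid =>
    if G.contains t then pvBuild ts G gid else pvBuild ts (G.insert t gid) (gid + 1)

lemma pvBuild_get?_stable (ts : List String) : ∀ (G : PySem.Dict String Int) (gid : Int)
    (t : String), G.contains t = true → (pvBuild ts G gid).get? t = G.get? t := by
  induction ts with
  | nil => intro G gid t _; rfl
  | cons s ts ih =>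
    intro G gid t ht
    by_cases hs : G.contains s = true
    · simp [pvBuild, hs, ih G gid t ht]
    · simp only [Bool.not_eq_true] at hs
      have hne : t ≠ s := by rintro rfl; rw [ht] at hs; cases hs
      have hc : (G.insert s gid).contains t = true := by
        rw [PySem.Dict.contains_insert, ht]; simp
      simp [pvBuild, hs, ih _ _ t hc, PySem.Dict.get?_insert_of_ne _ _ hne]

lemma pvBuild_getD_stable (ts : List String) (G : PySem.Dict String Int) (gid : Int)
    (t : String) (ht : G.contains t = true) :
    (pvBuild ts G gid).getD t 0 = G.getD t 0 := by
  rw [PySem.Dict.getD_eq_get?_getD, PySem.Dict.getD_eq_get?_getD, pvBuild_get?_stable ts G gid t ht]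

lemma pvAssign_eq_map (ts : List String) : ∀ (G : PySem.Dict String Int) (gid : Int),
    pvAssign ts G gid = ts.map (fun t => (pvBuild ts G gid).getD t 0) := by
  induction ts with
  | nil => intro G gid; rfl
  | cons s ts ih =>
    intro G gid
    by_cases hs : G.contains s = true
    · simp only [pvAssign, pvBuild, hs, if_true, List.map_cons, ih G gid]
      rw [pvBuild_getD_stable ts G gid s hs]
    · simp only [Bool.not_eq_true] at hs
      simp only [pvAssign, pvBuild, hs, Bool.false_eq_true, if_false, List.map_cons, ih _ _]
      rw [pvBuild_getD_stable ts (G.insert s gid) (gid+1) s (PySem.Dict.contains_insert_self _ _ _),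
        PySem.Dict.getD_insert_self]

-- ofList commutes with filter
lemma pv_filter_ofList (p : String → Bool) : ∀ (l : List String),
    (PySem.Set.ofList l).filter p = PySem.Set.ofList (l.filter p) := by
  intro l
  induction l with
  | nil => rfl
  | cons x xs ih =>
    rw [PySem.Set.ofList_cons]
    by_cases hx : p x = true
    · rw [List.filter_cons_of_pos hx, List.filter_cons_of_pos hx, PySem.Set.ofList_cons, ← ih]
      simp only [PySem.Set.discard]
      rw [List.filter_filter, List.filter_filter]
      exact congrArg (x :: ·) (List.filter_congr (fun a _ => Bool.and_comm _ _))
    · simp only [Bool.not_eq_true] at hx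
      rw [List.filter_cons_of_neg (by simp [hx]), List.filter_cons_of_neg (by simp [hx]), ← ih]
      simp only [PySem.Set.discard]
      rw [List.filter_filter]
      refine List.filter_congr (fun a _ => ?_)
      by_cases hpa : p a = true
      · have hax : (a == x) = false := by
          refine beq_eq_false_iff_ne.mpr (fun he => ?_)
          rw [he, hx] at hpa; cases hpa
        simp [hax, hpa]
      · simp only [Bool.not_eq_true] at hpa; simp [hpa]

-- A's first-loop gid of a text is 1 + its position among the distinct unseen texts
lemma pvBuild_getD_idx (ts : List String) : ∀ (G : PySem.Dict String Int) (gid : Int)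
    (t : String), t ∈ ts → G.contains t = false →
    (pvBuild ts G gid).getD t 0
      = gid + (List.idxOf t (PySem.Set.ofList (ts.filter (fun s => !G.contains s))) : Int) := by
  induction ts with
  | nil => intro G gid t ht _; cases ht
  | cons s ts ih =>
    intro G gid t ht hG
    by_cases hs : G.contains s = true
    · have hts : t ∈ ts := by
        rcases List.mem_cons.mp ht with rfl | h
        · rw [hG] at hs; cases hs
        · exact h
      have hfc : List.filter (fun r => !G.contains r) (s :: ts)
          = List.filter (fun r => !G.contains r) ts := by
        simp [hs]
      simp only [pvBuild, hs, if_true, hfc]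
      exact ih G gid t hts hG
    · simp only [Bool.not_eq_true] at hs
      have hfc : List.filter (fun r => !G.contains r) (s :: ts)
          = s :: List.filter (fun r => !G.contains r) ts := by
        simp [hs]
      simp only [pvBuild, hs, Bool.false_eq_true, if_false, hfc, PySem.Set.ofList_cons]
      by_cases hts : t = s
      · subst hts
        rw [pvBuild_getD_stable ts _ _ t (PySem.Dict.contains_insert_self _ _ _),
          PySem.Dict.getD_insert_self, List.idxOf_cons_self]
        simp
      · have htmem : t ∈ ts := by
          rcases List.mem_cons.mp ht with rfl | h
          · exact absurd rfl hts
          · exact h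
        have hG' : (G.insert s gid).contains t = false := by
          rw [PySem.Dict.contains_insert]
          simp [hts, hG]
        rw [ih (G.insert s gid) (gid + 1) t htmem hG']
        have hfilt : ts.filter (fun r => !(G.insert s gid).contains r)
            = (ts.filter (fun r => !G.contains r)).filter (fun r => !(r == s)) := by
          rw [List.filter_filter]
          refine List.filter_congr (fun a _ => ?_)
          rw [PySem.Dict.contains_insert]
          cases hax : (a == s) <;> cases hGa : G.contains a <;> simp
        rw [hfilt, ← pv_filter_ofList]
        simp only [PySem.Set.discard]
        rw [List.idxOf_cons_ne _ (Ne.symm hts)]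
        push_cast
        ring

-- closed form for A's first loop (mapping items = enumerate of the assigned gids)
lemma pv_loopA (ts : List String) : ∀ (n : Int) (G : PySem.Dict String Int)
    (M : PySem.Dict Int Int) (gid : Int),
    (∀ j : Int, n ≤ j → M.contains j = false) →
    (((PySem.List.enumerate ts n).foldl
        (fun (st : PySem.Dict String Int × PySem.Dict Int Int × Int) p =>
          if st.1.contains p.2 then
            (st.1, st.2.1.insert p.1 (st.1.getD p.2 0), st.2.2)
          else
            (st.1.insert p.2 st.2.2, st.2.1.insert p.1 st.2.2, st.2.2 + 1))
        (G, M, gid)).2.1).items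
      = M.items ++ PySem.List.enumerate (pvAssign ts G gid) n := by
  induction ts with
  | nil => intro n G M gid _; simp [pvAssign, PySem.List.enumerate_nil]
  | cons t ts ih =>
    intro n G M gid hM
    rw [PySem.List.enumerate_cons, List.foldl_cons]
    have hMn : M.contains n = false := hM n le_rfl
    have hM' : ∀ (v : Int) (j : Int), n + 1 ≤ j → (M.insert n v).contains j = false := by
      intro v j hj
      rw [PySem.Dict.contains_insert, hM j (by omega)]
      simp; omega
    by_cases ht : G.contains t = true
    · simp only [ht, if_true]
      rw [ih (n+1) G (M.insert n (G.getD t 0)) gid (hM' _)]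
      rw [PySem.Dict.items_insert_of_not_contains _ _ hMn]
      simp only [pvAssign, ht, if_true]
      rw [PySem.List.enumerate_cons, List.append_assoc]
      rfl
    · simp only [Bool.not_eq_true] at ht
      simp only [ht, Bool.false_eq_true, if_false]
      rw [ih (n+1) (G.insert t gid) (M.insert n gid) (gid+1) (hM' _)]
      rw [PySem.Dict.items_insert_of_not_contains _ _ hMn]
      simp only [pvAssign, ht, Bool.false_eq_true, if_false]
      rw [PySem.List.enumerate_cons, List.append_assoc]
      rfl

-- closed form for A's relabel loop
lemma pv_relabel (cnts : PySem.Dict Int Int) : ∀ (l : List (Int × Int)) (m : PySem.Dict Int Int),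
    m.keys.Nodup → (∀ p ∈ l, m.contains p.1 = true) → (l.map Prod.fst).Nodup →
    (l.foldl (fun (m : PySem.Dict Int Int) q => if cnts.getD q.2 0 ≤ 1 then m.insert q.1 0 else m) m).items
      = m.items.map (fun q => if l.any (fun p => p.1 == q.1 && decide (cnts.getD p.2 0 ≤ 1)) then (q.1, 0) else q) := by
  intro l
  induction l with
  | nil => intro m _ _ _; simp
  | cons p l ih =>
    intro m hnd hcont hlnd
    rw [List.foldl_cons]
    have hp : m.contains p.1 = true := hcont p (by simp)
    have hlnd2 : p.1 ∉ l.map Prod.fst ∧ (l.map Prod.fst).Nodup := by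
      rw [List.map_cons, List.nodup_cons] at hlnd; exact hlnd
    have hlnd' := hlnd2.2
    have hpnotl := hlnd2.1
    by_cases hc : cnts.getD p.2 0 ≤ 1
    · simp only [hc, if_true]
      have hnd' : (m.insert p.1 0).keys.Nodup := by
        rw [PySem.Dict.keys_insert_of_contains _ _ hp]; exact hnd
      have hcont' : ∀ q ∈ l, (m.insert p.1 0).contains q.1 = true := by
        intro q hq
        rw [PySem.Dict.contains_insert, hcont q (by simp [hq])]
        simp
      rw [ih (m.insert p.1 0) hnd' hcont' hlnd']
      rw [PySem.Dict.items_insert_of_contains _ _ hp, List.map_map]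
      apply List.map_congr_left
      intro q hq
      simp only [Function.comp_apply]
      by_cases hqp : q.1 = p.1
      · have hanyl : (l.any fun r => r.1 == p.1 && decide (cnts.getD r.2 0 ≤ 1)) = false := by
          rw [List.any_eq_false]
          intro r hr
          simp only [Bool.and_eq_true, beq_iff_eq, not_and]
          intro hre
          exact absurd (hre ▸ List.mem_map_of_mem hr) hpnotl
        simp [hqp, hanyl, hc]
      · have h1 : (q.1 == p.1) = false := by simp [hqp]
        have h2 : (p.1 == q.1) = false := by simp [Ne.symm hqp]
        simp only [h1, Bool.false_eq_true, if_false, List.any_cons, h2, Bool.false_and,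
          Bool.false_or]
    · simp only [hc, if_false]
      rw [ih m hnd (fun q hq => hcont q (by simp [hq])) hlnd']
      apply List.map_congr_left
      intro q _
      simp only [List.any_cons, hc, decide_false, Bool.and_false, Bool.false_or]

lemma pv_count_map (f : String → Int) : ∀ (ts : List String) (t : String),
    (∀ s ∈ ts, f s = f t → s = t) → (ts.map f).count (f t) = ts.count t := by
  intro ts
  induction ts with
  | nil => intro t _; rfl
  | cons s ts ih =>
    intro t hinj
    simp only [List.map_cons, List.count_cons]
    rw [ih t (fun r hr => hinj r (by simp [hr]))]
    by_cases h : s = t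
    · simp [h]
    · have : f s ≠ f t := fun he => h (hinj s (by simp) he)
      simp [h, this]

lemma pv_enum_map (c : Int → Bool) : ∀ (vs : List Int) (n : Int),
    (PySem.List.enumerate vs n).map (fun q => if c q.2 then (q.1, 0) else q)
      = PySem.List.enumerate (vs.map (fun v => if c v then 0 else v)) n := by
  intro vs
  induction vs with
  | nil => intro n; simp [PySem.List.enumerate_nil]
  | cons v vs ih =>
    intro n
    rw [PySem.List.enumerate_cons, List.map_cons, List.map_cons, PySem.List.enumerate_cons, ih]
    by_cases h : c v <;> simp [h]

lemma pv_any_self (c : Int → Bool) : ∀ (l : List (Int × Int)) (q : Int × Int),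
    (l.map Prod.fst).Nodup → q ∈ l → (l.any fun p => p.1 == q.1 && c p.2) = c q.2 := by
  intro l
  induction l with
  | nil => intro q _ hq; cases hq
  | cons p l ih =>
    intro q hnd hq
    have hnd' : p.1 ∉ l.map Prod.fst ∧ (l.map Prod.fst).Nodup := by
      rw [List.map_cons, List.nodup_cons] at hnd; exact hnd
    rcases List.mem_cons.mp hq with rfl | hmem
    · have hrest : (l.any fun p => p.1 == q.1 && c p.2) = false := by
        rw [List.any_eq_false]
        intro r hr
        simp only [Bool.and_eq_true, beq_iff_eq, not_and]
        intro hre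
        exact absurd (hre ▸ List.mem_map_of_mem hr) hnd'.1
      simp [List.any_cons, hrest]
    · have hne : (p.1 == q.1) = false := by
        simp only [beq_eq_false_iff_ne, ne_eq]
        intro he
        exact absurd (he ▸ List.mem_map_of_mem hmem) hnd'.1
      simp [List.any_cons, hne, ih q hnd'.2 hmem]

-- A's gid function, in closed form, for members of ts
lemma pv_fA_idx (ts : List String) (t : String) (ht : t ∈ ts) :
    (pvBuild ts PySem.Dict.empty 1).getD t 0 = 1 + (List.idxOf t (PySem.Set.ofList ts) : Int) := by
  have h := pvBuild_getD_idx ts PySem.Dict.empty 1 t ht (PySem.Dict.contains_empty t)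
  simpa [PySem.Dict.contains_empty, List.filter_true] using h

lemma pv_idxOf_mem_lt {t : String} {l : List String} (ht : t ∈ l) : List.idxOf t l < l.length := by
  induction l with
  | nil => cases ht
  | cons s l ih =>
    by_cases hs : s = t
    · subst hs; simp [List.idxOf_cons_self]
    · rw [List.idxOf_cons_ne _ hs]
      have : t ∈ l := by rcases List.mem_cons.mp ht with rfl | h; exact absurd rfl hs; exact h
      simpa [Nat.succ_lt_succ_iff] using ih this

lemma pv_fA_inj (ts : List String) (s t : String) (hs : s ∈ ts) (ht : t ∈ ts)
    (h : (pvBuild ts PySem.Dict.empty 1).getD s 0 = (pvBuild ts PySem.Dict.empty 1).getD t 0) :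
    s = t := by
  rw [pv_fA_idx ts s hs, pv_fA_idx ts t ht] at h
  have hidx : List.idxOf s (PySem.Set.ofList ts) = List.idxOf t (PySem.Set.ofList ts) := by
    omega
  have hs' : s ∈ PySem.Set.ofList ts := (PySem.Set.mem_ofList ts s).mpr hs
  have ht' : t ∈ PySem.Set.ofList ts := (PySem.Set.mem_ofList ts t).mpr ht
  have h1 := List.getElem_idxOf (pv_idxOf_mem_lt hs')
  have h2 := List.getElem_idxOf (pv_idxOf_mem_lt ht')
  rw [← h1, ← h2]
  congr 1

-- characterization of A: A returns enumerate of the per-index values pvVal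
lemma pvA_char (ts : List String) :
    exact_duplicate_groups ts = PySem.List.enumerate (ts.map (pvVal ts)) 0 := by
  have hempty : ∀ j : Int, (0:Int) ≤ j → (PySem.Dict.empty : PySem.Dict Int Int).contains j = false := by
    intro j _; exact PySem.Dict.contains_empty j
  have hA := pv_loopA ts 0 PySem.Dict.empty PySem.Dict.empty 1 hempty
  simp only [exact_duplicate_groups]
  set vals := pvAssign ts PySem.Dict.empty 1 with hvals
  set mapping := ((PySem.List.enumerate ts 0).foldl
    (fun (st : PySem.Dict String Int × PySem.Dict Int Int × Int) p =>
      if st.1.contains p.2 then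
        (st.1, st.2.1.insert p.1 (st.1.getD p.2 0), st.2.2)
      else
        (st.1.insert p.2 st.2.2, st.2.1.insert p.1 st.2.2, st.2.2 + 1))
    (PySem.Dict.empty, PySem.Dict.empty, 1)).2.1 with hmap
  have hitems : mapping.items = PySem.List.enumerate vals 0 := by simpa using hA
  have hvalues : mapping.values = vals := by
    simp only [PySem.Dict.values, hitems, PySem.List.map_snd_enumerate]
  have hfstnd : (mapping.items.map Prod.fst).Nodup := by
    rw [hitems]
    have hp := PySem.List.pairwise_lt_enumerate vals 0
    exact (List.Pairwise.map Prod.fst (fun a b h => h) hp).imp (fun h => ne_of_lt h)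
  have hkeys : mapping.keys.Nodup := hfstnd
  have hcont : ∀ p ∈ mapping.items, mapping.contains p.1 = true := by
    intro p hp
    rw [PySem.Dict.contains_iff_mem_keys]
    exact PySem.Dict.mem_keys_of_mem_items mapping hp
  rw [pv_relabel _ mapping.items mapping hkeys hcont hfstnd, hvalues]
  rw [List.map_congr_left (fun q hq => by
    rw [pv_any_self (fun g => decide ((PySem.Dict.counter vals).getD g 0 ≤ 1)) mapping.items q hfstnd hq])]
  rw [hitems, pv_enum_map (fun g => decide ((PySem.Dict.counter vals).getD g 0 ≤ 1)) vals 0]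
  congr 1
  set f : String → Int := fun t => (pvBuild ts PySem.Dict.empty 1).getD t 0 with hf
  have hvm : vals = ts.map f := pvAssign_eq_map ts PySem.Dict.empty 1
  rw [hvm, List.map_map]
  apply List.map_congr_left
  intro t ht
  simp only [Function.comp_apply, PySem.Dict.getD_counter]
  rw [pv_count_map f ts t (fun s hs he => pv_fA_inj ts s t hs ht he)]
  simp only [decide_eq_true_eq, pvVal, hf]
  rw [pv_fA_idx ts t ht]
  split_ifs with h1 h2 <;> first | rfl | omega

-- ===== B-side lemmas =====

-- the (Int) indices at which text t occurs in ts
def pvIdxs (ts : List String) (t : String) : List Int :=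
  ((PySem.List.enumerate ts).filter (fun p => p.2 == t)).map (fun p => p.1)

lemma pv_mem_idxs_iff (ts : List String) (t : String) (j : Int) :
    j ∈ pvIdxs ts t ↔ ∃ k : Nat, ∃ _h : k < ts.length, (k : Int) = j ∧ ts[k] = t := by
  constructor
  · intro h
    rcases List.mem_map.mp h with ⟨p, hp, rfl⟩
    rcases List.mem_filter.mp hp with ⟨hpe, hpt⟩
    rcases (PySem.List.mem_enumerate_iff ts 0 p).mp hpe with ⟨k, hk, rfl⟩
    exact ⟨k, hk, by simp, by simpa using hpt⟩
  · rintro ⟨k, hk, hkj, hkt⟩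
    subst hkj
    refine List.mem_map.mpr ⟨((k : Int), ts[k]), List.mem_filter.mpr ⟨?_, by simpa using hkt⟩, rfl⟩
    exact (PySem.List.mem_enumerate_iff ts 0 _).mpr ⟨k, hk, by simp⟩

lemma pv_idxs_bound (ts : List String) (t : String) (i : Int) (h : i ∈ pvIdxs ts t) :
    0 ≤ i ∧ i < (ts.length : Int) := by
  rcases (pv_mem_idxs_iff ts t i).mp h with ⟨k, hk, hkj, _⟩
  omega

lemma pv_idxs_det (ts : List String) (t t' : String) (i : Int)
    (h : i ∈ pvIdxs ts t) (h' : i ∈ pvIdxs ts t') : t = t' := by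
  rcases (pv_mem_idxs_iff ts t i).mp h with ⟨k, hk, hkj, hkt⟩
  rcases (pv_mem_idxs_iff ts t' i).mp h' with ⟨k', hk', hkj', hkt'⟩
  have : k = k' := by omega
  subst this
  rw [← hkt, ← hkt']

lemma pv_countP_enum (t : String) (ts : List String) : ∀ (s : Int),
    (PySem.List.enumerate ts s).countP (fun p => p.2 == t) = ts.count t := by
  induction ts with
  | nil => intro s; simp [PySem.List.enumerate_nil]
  | cons x ts ih =>
    intro s
    rw [PySem.List.enumerate_cons]
    simp [List.countP_cons, List.count_cons, ih (s + 1)]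

lemma pv_idxs_len (ts : List String) (t : String) :
    (pvIdxs ts t).length = ts.count t := by
  rw [pvIdxs, List.length_map, ← List.countP_eq_length_filter, pv_countP_enum]

-- the inner fill loop: sets exactly the listed (in-range) indices to g
lemma pv_fillInner_len (g : Int) (idxs : List Int) : ∀ (r : List Int),
    (idxs.foldl (fun (r : List Int) i => PySem.List.pySetD r i g) r).length = r.length := by
  induction idxs with
  | nil => intro r; rfl
  | cons i idxs ih => intro r; rw [List.foldl_cons, ih, PySem.List.length_pySetD]

lemma pv_fillInner (g : Int) (idxs : List Int) : ∀ (r : List Int) (j : Nat),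
    (∀ i ∈ idxs, 0 ≤ i ∧ i < (r.length : Int)) →
    (idxs.foldl (fun (r : List Int) i => PySem.List.pySetD r i g) r)[j]?
      = if (j : Int) ∈ idxs then (if j < r.length then some g else none) else r[j]? := by
  induction idxs with
  | nil => intro r j _; simp
  | cons i idxs ih =>
    intro r j hb
    have hi := hb i (by simp)
    rw [List.foldl_cons, PySem.List.pySetD_of_nonneg _ _ hi.1]
    have hlen : (r.set i.toNat g).length = r.length := List.length_set ..
    have hb' : ∀ x ∈ idxs, 0 ≤ x ∧ x < ((r.set i.toNat g).length : Int) := by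
      intro x hx; rw [hlen]; exact hb x (by simp [hx])
    rw [ih (r.set i.toNat g) j hb']
    by_cases hmem : (j : Int) ∈ idxs
    · simp [hmem, hlen, List.mem_cons]
    · have hout : ((j : Int) ∈ i :: idxs) ↔ (j : Int) = i := by simp [hmem]
      by_cases hji : (j : Int) = i
      · have hjt : i.toNat = j := by omega
        have hjl : j < r.length := by omega
        simp [hji, hjt, hjl]
      · have hjt : i.toNat ≠ j := by omega
        simp [hji, hjt]

lemma pv_fill_len (gl : List (Int × List Int)) : ∀ (r : List Int),
    (gl.foldl (fun (r : List Int) q =>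
        if 1 < PySem.List.len q.2 then
          q.2.foldl (fun (r : List Int) i => PySem.List.pySetD r i q.1) r
        else r) r).length = r.length := by
  induction gl with
  | nil => intro r; rfl
  | cons p gl ih =>
    intro r
    rw [List.foldl_cons]
    by_cases h : 1 < PySem.List.len p.2
    · simp only [h, if_true]; rw [ih, pv_fillInner_len]
    · simp only [h, if_false]; exact ih r

-- the outer fill loop: entry j gets the gid of the unique big group containing j
lemma pv_fill_get (gl : List (Int × List Int)) : ∀ (r : List Int) (j : Nat),
    (∀ p ∈ gl, ∀ i ∈ p.2, 0 ≤ i ∧ i < (r.length : Int)) →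
    gl.Pairwise (fun p q => ∀ i, i ∈ p.2 → i ∉ q.2) →
    (gl.foldl (fun (r : List Int) q =>
        if 1 < PySem.List.len q.2 then
          q.2.foldl (fun (r : List Int) i => PySem.List.pySetD r i q.1) r
        else r) r)[j]?
      = match gl.find? (fun p => decide ((j : Int) ∈ p.2) && decide (1 < PySem.List.len p.2)) with
        | some p => if j < r.length then some p.1 else none
        | none => r[j]? := by
  induction gl with
  | nil => intro r j _ _; simp
  | cons p gl ih =>
    intro r j hb hpw
    have hbp := hb p (by simp)
    have hbtail : ∀ q ∈ gl, ∀ i ∈ q.2, 0 ≤ i ∧ i < (r.length : Int) :=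
      fun q hq => hb q (by simp [hq])
    have hpwtail : gl.Pairwise (fun p q => ∀ i, i ∈ p.2 → i ∉ q.2) := hpw.tail
    have hpwhead : ∀ q ∈ gl, ∀ i, i ∈ p.2 → i ∉ q.2 := by
      intro q hq i hi
      exact (List.pairwise_cons.mp hpw).1 q hq i hi
    rw [List.foldl_cons]
    by_cases hbig : 1 < PySem.List.len p.2
    · simp only [hbig, if_true]
      have hlen1 : ∀ r' : List Int,
          (p.2.foldl (fun (r : List Int) i => PySem.List.pySetD r i p.1) r').length = r'.length :=
        fun r' => pv_fillInner_len p.1 p.2 r'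
      have hbtail' : ∀ q ∈ gl, ∀ i ∈ q.2, 0 ≤ i ∧ i <
          (((p.2.foldl (fun (r : List Int) i => PySem.List.pySetD r i p.1) r)).length : Int) := by
        intro q hq i hi; rw [hlen1]; exact hbtail q hq i hi
      rw [ih _ j hbtail' hpwtail]
      by_cases hmem : (j : Int) ∈ p.2
      · have hhead : (fun (q : Int × List Int) => decide ((j : Int) ∈ q.2) && decide (1 < PySem.List.len q.2)) p = true := by
          simp only [Bool.and_eq_true, decide_eq_true_eq]
          exact ⟨hmem, hbig⟩
        have hfind : List.find? (fun q : Int × List Int => decide ((j : Int) ∈ q.2) && decide (1 < PySem.List.len q.2)) (p :: gl) = some p :=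
          List.find?_cons_of_pos hhead
        rw [hfind]
        have hnone : gl.find? (fun q => decide ((j : Int) ∈ q.2) && decide (1 < PySem.List.len q.2)) = none := by
          rw [List.find?_eq_none]
          intro q hq
          simp only [Bool.and_eq_true, decide_eq_true_eq, not_and]
          intro hjq
          exact absurd hjq (hpwhead q hq (j : Int) hmem)
        rw [hnone]
        have hjl : j < r.length := by have := hbp _ hmem; omega
        rw [pv_fillInner p.1 p.2 r j hbp]
        simp [hmem, hjl]
      · have hhead : ¬ ((fun (q : Int × List Int) => decide ((j : Int) ∈ q.2) && decide (1 < PySem.List.len q.2)) p = true) := by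
          simp [hmem]
        have hfind : List.find? (fun q : Int × List Int => decide ((j : Int) ∈ q.2) && decide (1 < PySem.List.len q.2)) (p :: gl)
            = List.find? (fun q : Int × List Int => decide ((j : Int) ∈ q.2) && decide (1 < PySem.List.len q.2)) gl :=
          List.find?_cons_of_neg hhead
        rw [hfind]
        rw [pv_fillInner p.1 p.2 r j hbp]
        simp only [hmem, if_false, hlen1]
    · simp only [hbig, if_false]
      have hhead : ¬ ((fun (q : Int × List Int) => decide ((j : Int) ∈ q.2) && decide (1 < PySem.List.len q.2)) p = true) := by
        simp only [Bool.and_eq_true, decide_eq_true_eq, not_and]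
        intro _
        exact hbig
      have hfind : List.find? (fun q : Int × List Int => decide ((j : Int) ∈ q.2) && decide (1 < PySem.List.len q.2)) (p :: gl)
          = List.find? (fun q : Int × List Int => decide ((j : Int) ∈ q.2) && decide (1 < PySem.List.len q.2)) gl :=
        List.find?_cons_of_neg hhead
      rw [hfind, ih r j hbtail hpwtail]

-- find? over the enumerated groups, when no group matches / when exactly t's group matches
lemma pv_find_none (F : String → List Int) (Q : List Int → Bool) : ∀ (D : List String) (s : Int),
    (∀ d ∈ D, Q (F d) = false) →
    (PySem.List.enumerate (D.map F) s).find? (fun p => Q p.2) = none := by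
  intro D
  induction D with
  | nil => intro s _; simp [PySem.List.enumerate_nil]
  | cons d D ih =>
    intro s hQ
    rw [List.map_cons, PySem.List.enumerate_cons,
      List.find?_cons_of_neg (by simp [hQ d (by simp)]), ih (s+1) (fun x hx => hQ x (by simp [hx]))]

lemma pv_find_pos (F : String → List Int) (Q : List Int → Bool) (t : String) : ∀ (D : List String) (s : Int),
    t ∈ D → Q (F t) = true → (∀ d ∈ D, Q (F d) = true → d = t) →
    (PySem.List.enumerate (D.map F) s).find? (fun p => Q p.2)
      = some (s + (List.idxOf t D : Int), F t) := by
  intro D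
  induction D with
  | nil => intro s h; cases h
  | cons d D ih =>
    intro s ht hQ huniq
    rw [List.map_cons, PySem.List.enumerate_cons]
    by_cases hd : d = t
    · subst hd
      rw [List.find?_cons_of_pos (by simpa using hQ), List.idxOf_cons_self]
      simp
    · have hQd : ¬ (Q (F d) = true) := fun h => hd (huniq d (by simp) h)
      have htD : t ∈ D := by rcases List.mem_cons.mp ht with rfl | h; exact absurd rfl hd; exact h
      rw [List.find?_cons_of_neg (by simpa using hQd),
        ih (s+1) htD hQ (fun x hx h => huniq x (by simp [hx]) h), List.idxOf_cons_ne _ hd]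
      have : (s + 1) + (List.idxOf t D : Int) = s + ((List.idxOf t D).succ : Int) := by
        push_cast; ring
      rw [this]

-- the final dict comprehension over strictly increasing keys just lists the pairs
lemma pv_dictcomp (vs : List Int) : ∀ (n : Int) (d : PySem.Dict Int Int),
    (∀ j : Int, n ≤ j → d.contains j = false) →
    ((PySem.List.enumerate vs n).foldl
        (fun (d : PySem.Dict Int Int) p => d.insert p.1 p.2) d).items
      = d.items ++ PySem.List.enumerate vs n := by
  induction vs with
  | nil => intro n d _; simp [PySem.List.enumerate_nil]
  | cons v vs ih =>
    intro n d hd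
    rw [PySem.List.enumerate_cons, List.foldl_cons]
    have hdn : d.contains n = false := hd n le_rfl
    have hd' : ∀ j : Int, n + 1 ≤ j → (d.insert n v).contains j = false := by
      intro j hj
      rw [PySem.Dict.contains_insert, hd j (by omega)]
      simp; omega
    rw [ih (n+1) (d.insert n v) hd', PySem.Dict.items_insert_of_not_contains _ _ hdn,
      List.append_assoc]
    rfl

-- characterization of B: B also returns enumerate of the per-index values pvVal
lemma pvB_char (ts : List String) :
    exact_duplicate_groups_alt ts = PySem.List.enumerate (ts.map (pvVal ts)) 0 := by
  simp only [exact_duplicate_groups_alt]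
  set Gr := (PySem.List.enumerate ts).foldl
    (fun (g : PySem.Dict String (List Int)) p => g.modify p.2 [] (fun l => l ++ [p.1]))
    PySem.Dict.empty with hGr
  -- keys of the grouping dict: the distinct texts, in first-occurrence order
  have hkeys : Gr.keys = PySem.Set.ofList ts := by
    have h := PySem.Dict.keys_foldl_modify_key (PySem.List.enumerate ts) (fun p => p.2)
      ([] : List Int) (fun _ p l => l ++ [p.1]) PySem.Dict.empty
    simpa [PySem.Dict.keys_empty, PySem.Set.update_nil_left, PySem.List.map_snd_enumerate] using h
  have hnd : Gr.keys.Nodup := by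
    have h := PySem.Dict.nodup_keys_foldl_modify_key (PySem.List.enumerate ts) (fun p => p.2)
      ([] : List Int) (fun _ p l => l ++ [p.1]) PySem.Dict.empty PySem.Dict.nodup_keys_empty
    simpa using h
  -- values of the grouping dict: the per-text index lists
  have hget : ∀ t, Gr.getD t [] = pvIdxs ts t := by
    intro t
    have h := PySem.Dict.getD_foldl_modify_append
      ((PySem.List.enumerate ts).map (fun p => (p.2, p.1))) PySem.Dict.empty t
    rw [List.foldl_map] at h
    simpa [pvIdxs, List.filter_map, Function.comp, PySem.Dict.getD_empty, List.map_map] using h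
  have hvals : Gr.values = (PySem.Set.ofList ts).map (fun t => pvIdxs ts t) := by
    rw [PySem.Dict.values_eq_map_keys Gr hnd [], hkeys]
    exact List.map_congr_left (fun t _ => hget t)
  -- the zero-initialized array
  have hrep : PySem.List.pyRepeat [(0 : Int)] (PySem.List.len ts) = List.replicate ts.length 0 := by
    rw [PySem.List.pyRepeat_singleton, PySem.List.len_eq]
    simp
  rw [hvals, hrep]
  set resF := (PySem.List.enumerate ((PySem.Set.ofList ts).map (fun t => pvIdxs ts t)) 1).foldl
    (fun (r : List Int) q =>
      if 1 < PySem.List.len q.2 then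
        q.2.foldl (fun (r : List Int) i => PySem.List.pySetD r i q.1) r
      else r)
    (List.replicate ts.length 0) with hresF
  have hdict := pv_dictcomp resF 0 PySem.Dict.empty (fun j _ => PySem.Dict.contains_empty j)
  have hempt : (PySem.Dict.empty : PySem.Dict Int Int).items = [] := rfl
  rw [hdict, hempt, List.nil_append]
  congr 1
  -- resF = the per-index values, entry by entry
  have hbounds : ∀ p ∈ PySem.List.enumerate ((PySem.Set.ofList ts).map (fun t => pvIdxs ts t)) 1,
      ∀ i ∈ p.2, 0 ≤ i ∧ i < ((List.replicate ts.length (0 : Int)).length : Int) := by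
    intro p hp i hi
    rcases (PySem.List.mem_enumerate_iff _ _ p).mp hp with ⟨k, hk, rfl⟩
    rw [List.getElem_map] at hi
    rw [List.length_replicate]
    exact pv_idxs_bound ts _ i hi
  have hpw : (PySem.List.enumerate ((PySem.Set.ofList ts).map (fun t => pvIdxs ts t)) 1).Pairwise
      (fun p q => ∀ i, i ∈ p.2 → i ∉ q.2) := by
    have h1 : ((PySem.Set.ofList ts).map (fun t => pvIdxs ts t)).Pairwise
        (fun A B => ∀ i, i ∈ A → i ∉ B) := by
      refine List.pairwise_map.mpr ((PySem.Set.nodup_ofList ts).imp ?_)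
      intro a b hab i hia hib
      exact hab (pv_idxs_det ts a b i hia hib)
    have h2 := h1
    rw [← PySem.List.map_snd_enumerate ((PySem.Set.ofList ts).map (fun t => pvIdxs ts t)) 1] at h2
    exact List.pairwise_map.mp h2
  refine List.ext_getElem? (fun k => ?_)
  by_cases hk : k < ts.length
  · rw [hresF, pv_fill_get _ _ k hbounds hpw]
    have hkmem : (k : Int) ∈ pvIdxs ts ts[k] :=
      (pv_mem_idxs_iff ts ts[k] k).mpr ⟨k, hk, rfl, rfl⟩
    by_cases hc : ts.count ts[k] ≤ 1
    · have hnone : List.find? (fun p : Int × List Int => decide ((k : Int) ∈ p.2) && decide (1 < PySem.List.len p.2))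
          (PySem.List.enumerate ((PySem.Set.ofList ts).map (fun t => pvIdxs ts t)) 1) = none := by
        refine pv_find_none (fun t => pvIdxs ts t)
          (fun l => decide ((k : Int) ∈ l) && decide (1 < PySem.List.len l)) _ 1 ?_
        intro d _
        simp only [Bool.and_eq_false_iff]
        by_cases hd : (k : Int) ∈ pvIdxs ts d
        · right
          have : d = ts[k] := pv_idxs_det ts d ts[k] k hd hkmem
          subst this
          simp only [decide_eq_false_iff_not, not_lt, PySem.List.len_eq, pv_idxs_len]
          exact_mod_cast hc
        · left; simpa using hd
      rw [hnone]
      simp [hk, pvVal, hc]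
    · have hlen : (1 : Int) < PySem.List.len (pvIdxs ts ts[k]) := by
        rw [PySem.List.len_eq, pv_idxs_len]
        omega
      have hfind : List.find? (fun p : Int × List Int => decide ((k : Int) ∈ p.2) && decide (1 < PySem.List.len p.2))
          (PySem.List.enumerate ((PySem.Set.ofList ts).map (fun t => pvIdxs ts t)) 1)
            = some (1 + (List.idxOf ts[k] (PySem.Set.ofList ts) : Int), pvIdxs ts ts[k]) := by
        refine pv_find_pos (fun t => pvIdxs ts t)
          (fun l => decide ((k : Int) ∈ l) && decide (1 < PySem.List.len l)) ts[k] _ 1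
          ((PySem.Set.mem_ofList ts _).mpr (ts.getElem_mem hk)) ?_ ?_
        · simp only [Bool.and_eq_true, decide_eq_true_eq]
          exact ⟨hkmem, hlen⟩
        · intro d _ hQ
          simp only [Bool.and_eq_true, decide_eq_true_eq] at hQ
          exact pv_idxs_det ts d ts[k] k hQ.1 hkmem
      rw [hfind]
      simp only [List.length_replicate, hk, if_true]
      simp [hk, pvVal, hc]
  · have h1 : resF.length ≤ k := by
      rw [hresF, pv_fill_len, List.length_replicate]
      omega
    have h2 : (ts.map (pvVal ts)).length ≤ k := by
      rw [List.length_map]; omega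
    rw [List.getElem?_eq_none h1, List.getElem?_eq_none h2]

lemma pv_main (ts : List String) : exact_duplicate_groups ts = exact_duplicate_groups_alt ts := by
  rw [pvA_char, pvB_char]

-- ===== VERDICT (by name: the statement is the Claim_ definition above) =====
theorem exact_duplicate_groups_spec : Claim_equal_exact_duplicate_groups := by
  intro clean_texts _
  unfold Spec_exact_duplicate_groups
  exact pv_main clean_texts
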